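-- pv_equiv track=rewrite | github.com/systemsustainage-tech/Sustainage_Program_Deposu | backend/modules/reporting/multilingual_manager.py | translate_report_content
-- ===== SOURCE A (Python) =====
-- def translate_report_content(content: str, target_language: str, company_id: int = 0) -> str:
--     """Rapor içeriğini çevir"""
--     # Basit çeviri - gerçek uygulamada daha gelişmiş çeviri servisi kullanılabilir
--     translated_content = content
--
--     # Yaygın terimleri çevir
--     translations = {
--         'tr': {
--             'Sustainability Report': 'Sürdürülebilirlik Raporu',
--             'Environmental Performance': 'Çevresel Performans',
--             'Social Performance': 'Sosyal Performans',
--             'Economic Performance': 'Ekonomik Performans',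
--             'Governance': 'Yönetişim'
--         },
--         'en': {
--             'Sürdürülebilirlik Raporu': 'Sustainability Report',
--             'Çevresel Performans': 'Environmental Performance',
--             'Sosyal Performans': 'Social Performance',
--             'Ekonomik Performans': 'Economic Performance',
--             'Yönetişim': 'Governance'
--         }
--     }
--
--     if target_language in translations:
--         for original, translated in translations[target_language].items():
--             translated_content = translated_content.replace(original, translated)
--
--     return translated_content
-- ===== SOURCE B (Python) =====
-- # Single left-to-right scanner with an output buffer: at each position the first
-- # matching term of the selected language's table is emitted translated and skipped,
-- # otherwise the character is copied; replaces A's five sequential full-string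
-- # .replace passes (the keys are mutually non-interfering, so the results coincide).
--
-- _TRANSLATIONS = {
--     'tr': {
--         'Sustainability Report': 'Sürdürülebilirlik Raporu',
--         'Environmental Performance': 'Çevresel Performans',
--         'Social Performance': 'Sosyal Performans',
--         'Economic Performance': 'Ekonomik Performans',
--         'Governance': 'Yönetişim'
--     },
--     'en': {
--         'Sürdürülebilirlik Raporu': 'Sustainability Report',
--         'Çevresel Performans': 'Environmental Performance',
--         'Sosyal Performans': 'Social Performance',
--         'Ekonomik Performans': 'Economic Performance',
--         'Yönetişim': 'Governance'
--     }
-- }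
--
--
-- def translate_report_content(content: str, target_language: str, company_id: int = 0) -> str:
--     """Rapor içeriğini çevir (tek geçişli tarayıcı ile)."""
--     table = _TRANSLATIONS.get(target_language)
--     if table is None:
--         return content
--     out = []
--     i = 0
--     n = len(content)
--     while i < n:
--         for key, val in table.items():
--             if content.startswith(key, i):
--                 out.append(val)
--                 i += len(key)
--                 break
--         else:
--             out.append(content[i])
--             i += 1
--     return ''.join(out)
-- ===== Notes on version B (the rewrite author's own statement) =====
-- stated objective: alternative
-- what changed: Replaced the five sequential full-string .replace passes (each building an intermediate string) with one left-to-right scan that keeps an output buffer and, at each position, emits the first matching term's translation or copies the character.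
import Mathlib
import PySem

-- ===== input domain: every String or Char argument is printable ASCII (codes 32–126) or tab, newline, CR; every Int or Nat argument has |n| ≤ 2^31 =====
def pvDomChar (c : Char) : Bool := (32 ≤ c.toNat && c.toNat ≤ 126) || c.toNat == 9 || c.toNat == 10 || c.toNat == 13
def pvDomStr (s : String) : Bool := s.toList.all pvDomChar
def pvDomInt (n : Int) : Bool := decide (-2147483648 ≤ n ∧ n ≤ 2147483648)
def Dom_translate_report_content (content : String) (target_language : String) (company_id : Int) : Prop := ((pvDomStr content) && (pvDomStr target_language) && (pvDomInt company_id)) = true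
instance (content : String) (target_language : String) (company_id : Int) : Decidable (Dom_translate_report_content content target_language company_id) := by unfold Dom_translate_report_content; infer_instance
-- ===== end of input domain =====

-- B replaces A's five sequential full-string `.replace` passes by ONE left-to-right scan
-- with an output buffer; same return value, return value only.

-- shared DATA: the translation tables of the module (both implementations need them)
def pvTr : List (List Char × List Char) :=
  [("Sustainability Report".toList, "Sürdürülebilirlik Raporu".toList),
   ("Environmental Performance".toList, "Çevresel Performans".toList),
   ("Social Performance".toList, "Sosyal Performans".toList),
   ("Economic Performance".toList, "Ekonomik Performans".toList),
   ("Governance".toList, "Yönetişim".toList)]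

def pvEn : List (List Char × List Char) :=
  [("Sürdürülebilirlik Raporu".toList, "Sustainability Report".toList),
   ("Çevresel Performans".toList, "Environmental Performance".toList),
   ("Sosyal Performans".toList, "Social Performance".toList),
   ("Ekonomik Performans".toList, "Economic Performance".toList),
   ("Yönetişim".toList, "Governance".toList)]

-- ===== PORT A =====
-- One Python `str.replace k v` pass: left-to-right, non-overlapping (exact for nonempty k,
-- which is the only way A uses it).
def pvRep (k v : List Char) (s : List Char) : List Char :=
  match s with
  | [] => []
  | c :: t =>
    if k.isPrefixOf (c :: t) then v ++ pvRep k v (t.drop (k.length - 1))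
    else c :: pvRep k v t
termination_by s.length
decreasing_by all_goals simp_all [List.length_drop]

-- the `for original, translated in ….items(): … .replace(original, translated)` loop
def pvSeq (L : List (List Char × List Char)) (s : List Char) : List Char :=
  L.foldl (fun acc kv => pvRep kv.1 kv.2 acc) s

def translate_report_content (content : String) (target_language : String) (company_id : Int) : String :=
  if target_language = "tr" then String.ofList (pvSeq pvTr content.toList)
  else if target_language = "en" then String.ofList (pvSeq pvEn content.toList)
  else content

-- ===== PORT B =====
-- `_TRANSLATIONS.get(target_language)`
def pvTable (target_language : String) : Option (List (List Char × List Char)) :=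
  if target_language = "tr" then some pvTr
  else if target_language = "en" then some pvEn
  else none

-- the `while i < n:` scanner of Source B: `acc` is the `out` buffer (chunks, newest first,
-- joined at the end); advancing the index i is recursion on the remaining suffix; the
-- `for … break / else` over the table is `find?`.
def pvScan (L : List (List Char × List Char)) (acc : List (List Char)) (s : List Char) : List Char :=
  match s with
  | [] => acc.reverse.flatten
  | c :: t =>
    match L.find? (fun kv => kv.1.isPrefixOf (c :: t)) with
    | some kv => pvScan L (kv.2 :: acc) (t.drop (kv.1.length - 1))
    | none => pvScan L ([c] :: acc) t
termination_by s.length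
decreasing_by all_goals simp_all [List.length_drop]

def translate_report_content_alt (content : String) (target_language : String) (company_id : Int) : String :=
  match pvTable target_language with
  | none => content
  | some L => String.ofList (pvScan L [] content.toList)

-- ===== PRECONDITION & SPEC =====
def Spec_translate_report_content (content : String) (target_language : String) (company_id : Int) (out : String) : Prop := out = translate_report_content_alt content target_language company_id
instance (content : String) (target_language : String) (company_id : Int) (out : String) : Decidable (Spec_translate_report_content content target_language company_id out) := by unfold Spec_translate_report_content; infer_instance

-- ===== CLAIM (what is proved, stated in full; the proofs are below) =====
def Claim_equal_translate_report_content : Prop := ∀ (content : String) (target_language : String) (company_id : Int), Dom_translate_report_content content target_language company_id → Spec_translate_report_content content target_language company_id (translate_report_content content target_language company_id)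

-- ===== LEMMAS AND PROOFS =====

-- proof-only middle form: the scanner without its accumulator (direct recursion)
def pvOnePass (L : List (List Char × List Char)) (s : List Char) : List Char :=
  match s with
  | [] => []
  | c :: t =>
    match L.find? (fun kv => kv.1.isPrefixOf (c :: t)) with
    | some kv => kv.2 ++ pvOnePass L (t.drop (kv.1.length - 1))
    | none => c :: pvOnePass L t
termination_by s.length
decreasing_by all_goals simp_all [List.length_drop]

-- `pvCompat a b` : a and b agree on their common length (one is a prefix of the other)
def pvCompat (a b : List Char) : Bool := a.isPrefixOf b || b.isPrefixOf a

theorem pvCompat_false_iff (a b : List Char) :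
    pvCompat a b = false ↔ ¬ a <+: b ∧ ¬ b <+: a := by
  simp [pvCompat, Bool.eq_false_iff, List.isPrefixOf_iff_prefix]

theorem pvCompat_comm (a b : List Char) : pvCompat a b = pvCompat b a := by
  simp [pvCompat, Bool.or_comm]

theorem prefix_append_cases {a b c : List Char} (h : a <+: b ++ c) : a <+: b ∨ b <+: a := by
  rcases Nat.le_total a.length b.length with hle | hle
  · exact Or.inl (List.prefix_of_prefix_length_le h (List.prefix_append b c) hle)
  · exact Or.inr (List.prefix_of_prefix_length_le (List.prefix_append b c) h hle)

theorem pvRep_cons (k v : List Char) (c : Char) (t : List Char) :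
    pvRep k v (c :: t) =
      if k.isPrefixOf (c :: t) then v ++ pvRep k v (t.drop (k.length - 1))
      else c :: pvRep k v t := by
  rw [pvRep]

theorem pvOnePass_cons (L : List (List Char × List Char)) (c : Char) (t : List Char) :
    pvOnePass L (c :: t) =
      match L.find? (fun kv => kv.1.isPrefixOf (c :: t)) with
      | some kv => kv.2 ++ pvOnePass L (t.drop (kv.1.length - 1))
      | none => c :: pvOnePass L t := by
  rw [pvOnePass]

theorem pvSeq_cons_pair (kv : List Char × List Char) (L : List (List Char × List Char))
    (s : List Char) : pvSeq (kv :: L) s = pvSeq L (pvRep kv.1 kv.2 s) := rfl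

theorem pvSeq_append_list (P Q : List (List Char × List Char)) (s : List Char) :
    pvSeq (P ++ Q) s = pvSeq Q (pvSeq P s) := by
  simp [pvSeq, List.foldl_append]

theorem pvSeq_nil (L : List (List Char × List Char)) : pvSeq L [] = [] := by
  induction L with
  | nil => rfl
  | cons kv L ih => rw [pvSeq_cons_pair]; simpa [pvRep] using ih

-- a replace pass walks over a block x that nowhere starts a match of k
theorem pvRep_append (k v x : List Char) :
    ∀ (u : List Char), (∀ p < x.length, pvCompat (x.drop p) k = false) →
      pvRep k v (x ++ u) = x ++ pvRep k v u := by
  induction x with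
  | nil => intro u _; simp
  | cons c x' ih =>
    intro u h
    have h0 := (pvCompat_false_iff _ _).1 (by simpa using h 0 (by simp))
    have hnp : ¬ (k.isPrefixOf (c :: (x' ++ u)) = true) := by
      intro hp
      rw [List.isPrefixOf_iff_prefix] at hp
      rcases prefix_append_cases (b := c :: x') hp with h1 | h2
      · exact h0.2 h1
      · exact h0.1 h2
    rw [List.cons_append, pvRep_cons, if_neg hnp]
    simp [ih u (fun p hp => by simpa using h (p + 1) (by simp; omega))]

theorem pvRep_match (k v : List Char) (u : List Char) (hk : k ≠ []) :
    pvRep k v (k ++ u) = v ++ pvRep k v u := by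
  cases k with
  | nil => exact absurd rfl hk
  | cons kc k' =>
    rw [List.cons_append, pvRep_cons, if_pos]
    · simp
    · rw [List.isPrefixOf_iff_prefix]
      exact ⟨u, by simp⟩

theorem pvSeq_append (L : List (List Char × List Char)) (x : List Char) :
    ∀ (u : List Char), (∀ kv ∈ L, ∀ p < x.length, pvCompat (x.drop p) kv.1 = false) →
      pvSeq L (x ++ u) = x ++ pvSeq L u := by
  induction L with
  | nil => intro u _; rfl
  | cons kv L' ih =>
    intro u h
    rw [pvSeq_cons_pair, pvSeq_cons_pair,
        pvRep_append kv.1 kv.2 x u (h kv (List.mem_cons_self ..)),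
        ih (pvRep kv.1 kv.2 u) (fun kv' hm => h kv' (List.mem_cons_of_mem _ hm))]

-- if a prefix of the output of a replace pass is not a prefix of the input, it runs into
-- (a copy of) the inserted value v
theorem pvRep_prefix_new (k v : List Char) :
    ∀ (t a : List Char), a <+: pvRep k v t → ¬ a <+: t →
      ∃ p, p < a.length ∧ pvCompat (a.drop p) v = true := by
  intro t
  induction t with
  | nil =>
    intro a h1 h2
    rw [pvRep] at h1
    exact absurd (List.prefix_nil.mp h1 ▸ List.nil_prefix) h2
  | cons c t' ih =>
    intro a h1 h2
    rw [pvRep_cons] at h1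
    by_cases hp : k.isPrefixOf (c :: t') = true
    · rw [if_pos hp] at h1
      have hane : a ≠ [] := by rintro rfl; exact h2 List.nil_prefix
      refine ⟨0, by cases a with | nil => exact absurd rfl hane | cons _ _ => simp, ?_⟩
      simp only [List.drop_zero]
      rcases prefix_append_cases h1 with h | h <;>
        simp [pvCompat, List.isPrefixOf_iff_prefix, h]
    · rw [if_neg hp] at h1
      cases a with
      | nil => exact absurd List.nil_prefix h2
      | cons d a' =>
        obtain ⟨hd, ha'⟩ := List.cons_prefix_cons.mp h1
        have hna' : ¬ a' <+: t' := fun hh => h2 (List.cons_prefix_cons.mpr ⟨hd, hh⟩)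
        obtain ⟨p, hpl, hcp⟩ := ih a' ha' hna'
        exact ⟨p + 1, by simp; omega, by simpa using hcp⟩

-- the whole sequence of replace passes copies a character at which no key matches,
-- provided no key suffix is compatible with any value (no match can be created)
theorem pvSeq_cons_char (L : List (List Char × List Char)) (c : Char) :
    ∀ (t : List Char), (∀ kv ∈ L, ¬ kv.1 <+: (c :: t)) →
      (∀ a ∈ L, ∀ b ∈ L, ∀ q < b.1.length, 1 ≤ q → pvCompat (b.1.drop q) a.2 = false) →
      pvSeq L (c :: t) = c :: pvSeq L t := by
  induction L with
  | nil => intro t _ _; rfl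
  | cons kv L' ih =>
    intro t hn hKV
    have hrep : pvRep kv.1 kv.2 (c :: t) = c :: pvRep kv.1 kv.2 t := by
      rw [pvRep_cons, if_neg]
      intro hp
      exact hn kv (List.mem_cons_self ..) (List.isPrefixOf_iff_prefix.mp hp)
    rw [pvSeq_cons_pair, pvSeq_cons_pair, hrep]
    apply ih (pvRep kv.1 kv.2 t)
    · intro kv' hm hpre
      by_cases hold : kv'.1 <+: c :: t
      · exact hn kv' (List.mem_cons_of_mem _ hm) hold
      · cases ha : kv'.1 with
        | nil => exact hold (ha ▸ List.nil_prefix)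
        | cons d a' =>
          rw [ha] at hpre
          obtain ⟨hd, ha'⟩ := List.cons_prefix_cons.mp hpre
          have hna' : ¬ a' <+: t := fun hh => hold (ha ▸ List.cons_prefix_cons.mpr ⟨hd, hh⟩)
          obtain ⟨p, hpl, hcp⟩ := pvRep_prefix_new kv.1 kv.2 t a' ha' hna'
          have hfalse := hKV kv (List.mem_cons_self ..) kv' (List.mem_cons_of_mem _ hm)
            (p + 1) (by rw [ha]; simp; omega) (by omega)
          rw [ha] at hfalse
          simp only [List.drop_succ_cons] at hfalse
          rw [hfalse] at hcp
          exact Bool.false_ne_true hcp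
    · intro a ha b hb q hq hq1
      exact hKV a (List.mem_cons_of_mem _ ha) b (List.mem_cons_of_mem _ hb) q hq hq1

-- the whole sequence of replace passes performs the replacement (k,v) when it matches at the
-- head: keys before k cannot touch the match, keys after k cannot touch the inserted value
theorem pvSeq_match (P Q : List (List Char × List Char)) (k v u : List Char) (hk : k ≠ [])
    (hP : ∀ kv ∈ P, ∀ p < k.length, pvCompat (k.drop p) kv.1 = false)
    (hQ : ∀ kv ∈ Q, ∀ p < v.length, pvCompat (v.drop p) kv.1 = false) :
    pvSeq (P ++ (k, v) :: Q) (k ++ u) = v ++ pvSeq (P ++ (k, v) :: Q) u := by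
  rw [pvSeq_append_list, pvSeq_append_list P ((k, v) :: Q) u,
      pvSeq_append P k u hP, pvSeq_cons_pair, pvSeq_cons_pair,
      pvRep_match k v (pvSeq P u) hk, pvSeq_append Q v (pvRep k v (pvSeq P u)) hQ]

-- MAIN 1: under the (decidable, table-specific) non-interference conditions, the five
-- sequential replace passes equal the direct one-pass recursion
theorem pvSeq_eq_onePass (L : List (List Char × List Char))
    (hne : ∀ kv ∈ L, kv.1 ≠ ([] : List Char))
    (hpair : L.Pairwise fun a b => pvCompat a.1 b.1 = false)
    (hKK : ∀ a ∈ L, ∀ b ∈ L, ∀ p < a.1.length, 0 < p → pvCompat (a.1.drop p) b.1 = false)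
    (hKV : ∀ a ∈ L, ∀ b ∈ L, ∀ q < b.1.length, 1 ≤ q → pvCompat (b.1.drop q) a.2 = false)
    (hVK : ∀ a ∈ L, ∀ b ∈ L, ∀ p < a.2.length, pvCompat (a.2.drop p) b.1 = false) :
    ∀ s, pvSeq L s = pvOnePass L s := by
  suffices H : ∀ n, ∀ s : List Char, s.length ≤ n → pvSeq L s = pvOnePass L s by
    intro s; exact H s.length s le_rfl
  intro n
  induction n with
  | zero =>
    intro s hs
    have : s = [] := List.length_eq_zero_iff.mp (Nat.le_zero.mp hs)
    subst this
    rw [pvSeq_nil, pvOnePass]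
  | succ n ihn =>
    intro s hs
    cases s with
    | nil => rw [pvSeq_nil, pvOnePass]
    | cons c t =>
      cases hf : L.find? (fun kv => kv.1.isPrefixOf (c :: t)) with
      | none =>
        have hn : ∀ kv ∈ L, ¬ kv.1 <+: c :: t := by
          intro kv hm hpre
          have := List.find?_eq_none.mp hf kv hm
          simp [List.isPrefixOf_iff_prefix] at this
          exact this hpre
        rw [pvSeq_cons_char L c t hn hKV, pvOnePass_cons, hf,
            ihn t (by simpa using Nat.lt_succ_iff.mp (by simpa using hs))]
      | some kv =>
        have hmem : kv ∈ L := List.mem_of_find?_eq_some hf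
        have hpre : kv.1 <+: c :: t := by
          have := List.find?_some hf
          simpa [List.isPrefixOf_iff_prefix] using this
        obtain ⟨u, hu⟩ := hpre
        obtain ⟨P, Q, hPQ⟩ := List.append_of_mem hmem
        have hcross : ∀ a ∈ P, pvCompat a.1 kv.1 = false := by
          have := (List.pairwise_append.mp (hPQ ▸ hpair)).2.2
          intro a ha
          exact this a ha kv (List.mem_cons_self ..)
        have hP : ∀ kv' ∈ P, ∀ p < kv.1.length, pvCompat (kv.1.drop p) kv'.1 = false := by
          intro kv' hm p hp
          rcases Nat.eq_zero_or_pos p with rfl | hpos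
          · simpa [pvCompat_comm] using hcross kv' hm
          · exact hKK kv hmem kv' (hPQ ▸ (List.mem_append.mpr (Or.inl hm))) p hp hpos
        have hQ : ∀ kv' ∈ Q, ∀ p < kv.2.length, pvCompat (kv.2.drop p) kv'.1 = false := by
          intro kv' hm p hp
          exact hVK kv hmem kv'
            (hPQ ▸ (List.mem_append.mpr (Or.inr (List.mem_cons_of_mem _ hm)))) p hp
        have hkne : kv.1 ≠ [] := hne kv hmem
        have hul : u.length ≤ n := by
          have : kv.1.length + u.length = t.length + 1 := by
            have := congrArg List.length hu
            simpa using this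
          have h1 : 1 ≤ kv.1.length := by
            cases hk : kv.1 with
            | nil => exact absurd hk hkne
            | cons _ _ => simp
          have hs' : t.length + 1 ≤ n + 1 := by simpa using hs
          omega
        have hdrop : t.drop (kv.1.length - 1) = u := by
          cases hk : kv.1 with
          | nil => exact absurd hk hkne
          | cons kc k' =>
            rw [hk, List.cons_append] at hu
            injection hu with h1 h2
            rw [← h2]
            simp
        calc pvSeq L (c :: t) = pvSeq L (kv.1 ++ u) := by rw [hu]
          _ = kv.2 ++ pvSeq L u := by
              rw [hPQ]
              have := pvSeq_match P Q kv.1 kv.2 u hkne hP hQ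
              simpa using this
          _ = kv.2 ++ pvOnePass L u := by rw [ihn u hul]
          _ = pvOnePass L (c :: t) := by rw [pvOnePass_cons, hf]; simp [hdrop]

-- MAIN 2: the buffered scanner equals the direct one-pass recursion (accumulator invariant)
theorem pvScan_eq (L : List (List Char × List Char)) :
    ∀ (s : List Char) (acc : List (List Char)),
      pvScan L acc s = acc.reverse.flatten ++ pvOnePass L s := by
  suffices H : ∀ n, ∀ s : List Char, s.length ≤ n → ∀ acc,
      pvScan L acc s = acc.reverse.flatten ++ pvOnePass L s by
    intro s acc; exact H s.length s le_rfl acc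
  intro n
  induction n with
  | zero =>
    intro s hs acc
    have : s = [] := List.length_eq_zero_iff.mp (Nat.le_zero.mp hs)
    subst this
    rw [pvScan, pvOnePass]; simp
  | succ n ihn =>
    intro s hs acc
    cases s with
    | nil => rw [pvScan, pvOnePass]; simp
    | cons c t =>
      rw [pvScan, pvOnePass_cons]
      cases hf : L.find? (fun kv => kv.1.isPrefixOf (c :: t)) with
      | none =>
        rw [ihn t (by simpa using Nat.lt_succ_iff.mp (by simpa using hs)) ([c] :: acc)]
        simp
      | some kv =>
        have ht : t.length ≤ n := by simpa using hs
        have hd : (t.drop (kv.1.length - 1)).length ≤ n := by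
          simp only [List.length_drop]; omega
        simp only [ihn (t.drop (kv.1.length - 1)) hd (kv.2 :: acc)]
        simp

theorem pvTr_eq : ∀ s, pvSeq pvTr s = pvScan pvTr [] s := by
  intro s
  rw [pvScan_eq pvTr s [],
      pvSeq_eq_onePass pvTr (by decide) (by decide) (by decide) (by decide) (by decide) s]
  simp

theorem pvEn_eq : ∀ s, pvSeq pvEn s = pvScan pvEn [] s := by
  intro s
  rw [pvScan_eq pvEn s [],
      pvSeq_eq_onePass pvEn (by decide) (by decide) (by decide) (by decide) (by decide) s]
  simp

-- ===== VERDICT (by name: the statement is the Claim_ definition above) =====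
theorem translate_report_content_spec : Claim_equal_translate_report_content := by
  intro content target_language company_id _
  unfold Spec_translate_report_content translate_report_content translate_report_content_alt pvTable
  by_cases h1 : target_language = "tr"
  · simp [h1, pvTr_eq]
  · by_cases h2 : target_language = "en"
    · simp [h2, pvEn_eq]
    · simp [h1, h2]
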